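-- pv_equiv track=rewrite | github.com/blacksegal/ascon_weak_key_analysis | weak_keys_small.py | coeff_sWK
-- ===== SOURCE A (Python) =====
-- def combs(iterable, r):
--     pool = tuple(iterable)
--     n = len(pool)
--     if r > n:
--         return
--     indices = list(range(r))
--     yield list(pool[i] for i in indices)
--     while True:
--         for i in reversed(range(r)):
--             if indices[i] != i + n - r:
--                 break
--         else:
--             return
--         indices[i] += 1
--         for j in range(i + 1, r):
--             indices[j] = indices[j - 1] + 1
--         yield list(pool[i] for i in indices)
--
-- def coeff_sWK(num_index):
--     I = list(combs([0, 1, 2, 3], num_index))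
--     KEYS = []
--     for XX in I:
--         for i in range(1 << 8):
--             B = [int(y) for y in '{0:08b}'.format(i)]
--             count = 0
--             for x in XX:
--                 if B[x] == 0 and B[x + 4] == 1:
--                     count = count + 1
--                 else:
--                     break
--             if count == len(XX):
--                 KEYS.append(i)
--     return KEYS
-- ===== SOURCE B (Python) =====
-- def coeff_sWK(num_index):
--     # B builds each key by construction (base bits + enumeration of free bit
--     # positions, LSB-first doubling yields ascending order) instead of
--     # scanning all 256 candidates per combination.
--     def choose(pool, r):
--         if r <= 0:
--             return [[]]
--         if r > len(pool):
--             return []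
--         first, rest = pool[0], pool[1:]
--         return [[first] + c for c in choose(rest, r - 1)] + choose(rest, r)
--
--     KEYS = []
--     for XX in choose([0, 1, 2, 3], num_index):
--         base = 0
--         fixed = set()
--         for x in XX:
--             base += 2 ** (3 - x)      # bit x+4 of the 8-char MSB-first string
--             fixed.add(7 - x)          # bit x must be 0
--             fixed.add(3 - x)          # bit x+4 is pinned to 1
--         keys = [base]
--         for p in range(8):            # free positions, least significant first
--             if p not in fixed:
--                 keys = keys + [k + 2 ** p for k in keys]
--         KEYS.extend(keys)
--     return KEYS
-- ===== Notes on version B (the rewrite author's own statement) =====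
-- stated objective: alternative
-- what changed: B replaces the hand-rolled index-stepping combinations generator with a recursive pick/skip chooser and, instead of testing every candidate byte per combination, constructs the matching keys directly (base bits for the pinned positions, LSB-first doubling over the free positions, which yields them already in ascending order).
import Mathlib
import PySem

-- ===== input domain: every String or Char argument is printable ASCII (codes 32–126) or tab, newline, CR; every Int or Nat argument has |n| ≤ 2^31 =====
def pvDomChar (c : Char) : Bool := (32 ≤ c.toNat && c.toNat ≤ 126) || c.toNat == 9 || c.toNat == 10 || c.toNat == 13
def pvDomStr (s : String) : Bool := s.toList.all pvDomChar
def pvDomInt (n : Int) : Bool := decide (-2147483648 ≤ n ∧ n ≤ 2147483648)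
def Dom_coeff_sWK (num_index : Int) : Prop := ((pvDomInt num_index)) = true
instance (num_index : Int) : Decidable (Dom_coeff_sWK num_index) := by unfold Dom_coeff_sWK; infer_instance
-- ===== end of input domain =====

-- B: keys are CONSTRUCTED per combination (pinned bits + free-position doubling)
-- instead of A's scan over every candidate byte; combinations come from a
-- recursive pick/skip chooser instead of A's index-stepping generator.

-- ===== PORT A =====

-- one iteration of A's `while True` body; fuel only guarantees termination
-- (the loop runs exactly C(n,r) times ≤ 2^pool.length, so fuel never runs out).
-- indices[i] reads use pyGet?.getD 0: i is drawn from range(r) with r = len(indices),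
-- so the index is always in range (exact).
def pvCombsLoop (pool : List Int) (n r : Int) (indices : List Int)
    (acc : List (List Int)) : Nat → List (List Int)
  | 0 => acc
  | fuel + 1 =>
    -- `for i in reversed(range(r)): if indices[i] != i + n - r: break / else: return`
    match (PySem.List.pyRange 0 r 1).reverse.find?
        (fun i => (PySem.List.pyGet? indices i).getD 0 ≠ i + n - r) with
    | none => acc
    | some i =>
      -- indices[i] += 1   (i ≥ 0 here, so i.toNat is exact)
      let indices := indices.set i.toNat ((PySem.List.pyGet? indices i).getD 0 + 1)
      -- for j in range(i+1, r): indices[j] = indices[j-1] + 1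
      let indices := (PySem.List.pyRange (i + 1) r 1).foldl
        (fun ind j => ind.set j.toNat ((PySem.List.pyGet? ind (j - 1)).getD 0 + 1)) indices
      pvCombsLoop pool n r indices
        (acc ++ [indices.map (fun k => (PySem.List.pyGet? pool k).getD 0)]) fuel

def pvCombs (pool : List Int) (r : Int) : List (List Int) :=
  let n : Int := pool.length
  if r > n then []
  else
    let indices := PySem.List.pyRange 0 r 1
    pvCombsLoop pool n r indices
      [indices.map (fun k => (PySem.List.pyGet? pool k).getD 0)]
      (2 ^ pool.length)

-- '{0:08b}'.format(i) digit list; exact for 0 ≤ i < 256 (the only i used).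
def pvBits8 (i : Int) : List Int :=
  [i / 128 % 2, i / 64 % 2, i / 32 % 2, i / 16 % 2, i / 8 % 2, i / 4 % 2, i / 2 % 2, i % 2]

-- `for x in XX: if B[x]==0 and B[x+4]==1: count+=1 else: break`
-- B has length 8 and x ∈ {0,1,2,3}, so pyGet?.getD 0 is exact.
def pvCount (B : List Int) : List Int → Int → Int
  | [], c => c
  | x :: rest, c =>
    if (PySem.List.pyGet? B x).getD 0 = 0 ∧ (PySem.List.pyGet? B (x + 4)).getD 0 = 1 then
      pvCount B rest (c + 1)
    else c

def coeff_sWK (num_index : Int) : List Int :=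
  (pvCombs [0, 1, 2, 3] num_index).foldl
    (fun KEYS XX =>
      (PySem.List.pyRange 0 256 1).foldl
        (fun KEYS i =>
          let B := pvBits8 i
          let count := pvCount B XX 0
          if count = (XX.length : Int) then KEYS ++ [i] else KEYS)
        KEYS)
    []

-- ===== PORT B =====

-- recursive chooser: pick the head or skip it
def pvChoose : List Int → Int → List (List Int)
  | pool, r =>
    if r ≤ 0 then [[]]
    else if r > (pool.length : Int) then []
    else
      match pool with
      | [] => []   -- unreachable: r > 0 and r ≤ 0 = pool.length is absurd
      | first :: rest =>
        ((pvChoose rest (r - 1)).map (fun c => first :: c)) ++ pvChoose rest r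
termination_by structural pool _ => pool

-- 2 ** (3 - x) / 2 ** p: exponents are ≥ 0 here (x ∈ {0..3}, p ∈ range(8)), so .toNat is exact
def coeff_sWK_alt (num_index : Int) : List Int :=
  (pvChoose [0, 1, 2, 3] num_index).foldl
    (fun KEYS XX =>
      let bf := XX.foldl
        (fun (bf : Int × PySem.Set Int) x =>
          (bf.1 + 2 ^ (3 - x).toNat,
           PySem.Set.add (PySem.Set.add bf.2 (7 - x)) (3 - x)))
        (0, PySem.Set.ofList [])
      let keys := (PySem.List.pyRange 0 8 1).foldl
        (fun keys p =>
          if ¬ (p ∈ bf.2) then keys ++ keys.map (fun k => k + 2 ^ p.toNat) else keys)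
        [bf.1]
      KEYS ++ keys)
    []

-- ===== PRECONDITION & SPEC =====
def Spec_coeff_sWK (num_index : Int) (out : List Int) : Prop := out = coeff_sWK_alt num_index
instance (num_index : Int) (out : List Int) : Decidable (Spec_coeff_sWK num_index out) := by unfold Spec_coeff_sWK; infer_instance

-- ===== CLAIM (what is proved, stated in full; the proofs are below) =====
def Claim_equal_coeff_sWK : Prop := ∀ (num_index : Int), Dom_coeff_sWK num_index → Spec_coeff_sWK num_index (coeff_sWK num_index)

-- ===== LEMMAS AND PROOFS =====

theorem pvCombs_nonpos {r : Int} (h : r ≤ 0) : pvCombs [0, 1, 2, 3] r = [[]] := by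
  have hr : PySem.List.pyRange 0 r 1 = [] := by
    simp [PySem.List.pyRange]; omega
  unfold pvCombs pvCombsLoop
  simp [hr, show ¬ r > (4 : Int) by omega]

theorem pvChoose_nonpos {r : Int} (h : r ≤ 0) : pvChoose [0, 1, 2, 3] r = [[]] := by
  unfold pvChoose; simp [h]

theorem pvCombs_big {r : Int} (h : 4 < r) : pvCombs [0, 1, 2, 3] r = [] := by
  unfold pvCombs
  simp
  intro hc; exact absurd h (by omega)

theorem pvChoose_big {r : Int} (h : 4 < r) : pvChoose [0, 1, 2, 3] r = [] := by
  unfold pvChoose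
  simp [show ¬ r ≤ 0 by omega]
  intro hc; exact absurd h (by omega)

-- ===== VERDICT (by name: the statement is the Claim_ definition above) =====
set_option maxRecDepth 100000 in
theorem coeff_sWK_spec : Claim_equal_coeff_sWK := by
  intro n _
  unfold Spec_coeff_sWK
  rcases (by omega : n ≤ 0 ∨ 0 < n) with h0 | h0
  · unfold coeff_sWK coeff_sWK_alt
    rw [pvCombs_nonpos h0, pvChoose_nonpos h0]
    decide
  · rcases (by omega : n ≤ 4 ∨ 4 < n) with h4 | h4
    · interval_cases n <;> decide
    · unfold coeff_sWK coeff_sWK_alt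
      rw [pvCombs_big h4, pvChoose_big h4]
      simp
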